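-- pv_equiv track=rewrite | github.com/syn-systema/GNSP | gnsp/category/protocol.py | detect_syn_flood
-- ===== SOURCE A (Python) =====
-- from typing import Any, Callable, Dict, List, Optional, Set, Tuple
--
-- def detect_syn_flood(
--
--     events: List[Tuple[str, str]],
--     threshold: int = 100,
-- ) -> bool:
--     """
--     Detect potential SYN flood attack.
--
--     Args:
--         events: List of (source_ip, trigger) tuples.
--         threshold: Number of SYNs without ACK to trigger alert.
--
--     Returns:
--         True if SYN flood detected.
--     """
--     syn_counts: Dict[str, int] = {}
--     ack_counts: Dict[str, int] = {}
--
--     for source_ip, trigger in events: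
--         if trigger == "recv SYN":
--             syn_counts[source_ip] = syn_counts.get(source_ip, 0) + 1
--         elif trigger == "recv ACK":
--             ack_counts[source_ip] = ack_counts.get(source_ip, 0) + 1
--
--     # Check for sources with many SYNs but few ACKs
--     for source_ip, syn_count in syn_counts.items():
--         ack_count = ack_counts.get(source_ip, 0)
--         if syn_count - ack_count > threshold:
--             return True
--
--     return False
-- ===== SOURCE B (Python) =====
-- def detect_syn_flood(events, threshold=100):
--     # Alternative: no dicts -- collect the set of IPs that ever sent a SYN,
--     # then for each such IP sum signed SYN/ACK deltas directly over the events.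
--     syn_ips = {ip for ip, t in events if t == "recv SYN"}
--     return any(
--         sum((t == "recv SYN") - (t == "recv ACK") for ip2, t in events if ip2 == ip)
--         > threshold
--         for ip in syn_ips
--     )
-- ===== Notes on version B (the rewrite author's own statement) =====
-- stated objective: alternative
-- what changed: Replaces the two count-dicts plus a second items() scan by a dict-free formulation: a set comprehension of SYN-sending IPs and, per IP, a direct signed sum of SYN/ACK deltas over the events.
import Mathlib
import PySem

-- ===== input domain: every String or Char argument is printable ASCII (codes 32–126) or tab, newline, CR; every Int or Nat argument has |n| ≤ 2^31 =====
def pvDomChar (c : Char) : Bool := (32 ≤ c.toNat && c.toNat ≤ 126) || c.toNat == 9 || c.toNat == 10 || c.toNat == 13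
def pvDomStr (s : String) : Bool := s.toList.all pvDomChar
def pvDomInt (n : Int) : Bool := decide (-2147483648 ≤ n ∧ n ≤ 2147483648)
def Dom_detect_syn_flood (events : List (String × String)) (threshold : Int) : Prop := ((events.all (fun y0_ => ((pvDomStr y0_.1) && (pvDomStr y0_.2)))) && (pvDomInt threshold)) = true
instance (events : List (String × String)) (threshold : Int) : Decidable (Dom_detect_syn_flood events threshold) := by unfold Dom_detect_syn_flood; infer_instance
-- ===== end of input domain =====

-- B replaces A's two count-dicts plus second items() scan by a dict-free set-of-SYN-IPs
-- plus per-IP signed sum over the events (objective: alternative, same result, no speed claim).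


-- ===== PORT A =====
-- literal transliteration: one loop building syn_counts and ack_counts, then a scan of
-- syn_counts.items() with early return (= List.any)
def detect_syn_flood (events : List (String × String)) (threshold : Int) : Bool :=
  let st := events.foldl
    (fun (p : PySem.Dict String Int × PySem.Dict String Int) e =>
      if e.2 == "recv SYN" then (p.1.insert e.1 (p.1.getD e.1 0 + 1), p.2)
      else if e.2 == "recv ACK" then (p.1, p.2.insert e.1 (p.2.getD e.1 0 + 1))
      else p)
    (PySem.Dict.empty, PySem.Dict.empty)
  st.1.items.any (fun kv => decide (kv.2 - st.2.getD kv.1 0 > threshold))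

-- ===== PORT B =====
-- literal transliteration of Source B: set comprehension of SYN IPs, then any over per-IP signed sums
def detect_syn_flood_alt (events : List (String × String)) (threshold : Int) : Bool :=
  let synIps : PySem.Set String :=
    PySem.Set.ofList ((events.filter (fun e => e.2 == "recv SYN")).map (·.1))
  synIps.any (fun ip =>
    decide (((events.filter (fun e => e.1 == ip)).map (fun e =>
      (if e.2 == "recv SYN" then (1 : Int) else 0) -
      (if e.2 == "recv ACK" then (1 : Int) else 0))).sum > threshold))

-- ===== PRECONDITION & SPEC =====
def Spec_detect_syn_flood (events : List (String × String)) (threshold : Int) (out : Bool) : Prop := out = detect_syn_flood_alt events threshold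
instance (events : List (String × String)) (threshold : Int) (out : Bool) : Decidable (Spec_detect_syn_flood events threshold out) := by unfold Spec_detect_syn_flood; infer_instance

-- ===== CLAIM (what is proved, stated in full; the proofs are below) =====
def Claim_equal_detect_syn_flood : Prop := ∀ (events : List (String × String)) (threshold : Int), Dom_detect_syn_flood events threshold → Spec_detect_syn_flood events threshold (detect_syn_flood events threshold)

-- ===== LEMMAS AND PROOFS =====

-- A's one loop over events splits into two counting loops over the filtered ip lists
lemma pvFoldPair (events : List (String × String))
    (s a : PySem.Dict String Int) :
    events.foldl
      (fun (p : PySem.Dict String Int × PySem.Dict String Int) e =>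
        if e.2 == "recv SYN" then (p.1.insert e.1 (p.1.getD e.1 0 + 1), p.2)
        else if e.2 == "recv ACK" then (p.1, p.2.insert e.1 (p.2.getD e.1 0 + 1))
        else p) (s, a)
    = (((events.filter (fun e => e.2 == "recv SYN")).map (·.1)).foldl
         (fun d x => d.insert x (d.getD x 0 + 1)) s,
       ((events.filter (fun e => e.2 == "recv ACK")).map (·.1)).foldl
         (fun d x => d.insert x (d.getD x 0 + 1)) a) := by
  induction events generalizing s a with
  | nil => simp
  | cons e rest ih =>
    obtain ⟨ip, t⟩ := e
    by_cases h1 : t = "recv SYN"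
    · subst h1
      simp only [List.foldl_cons, List.filter_cons, List.map_cons,
        show (("recv SYN" : String) == "recv SYN") = true by decide,
        show (("recv SYN" : String) == "recv ACK") = false by decide,
        eq_self_iff_true, if_true, Bool.false_eq_true, if_false]
      exact ih _ _
    · by_cases h2 : t = "recv ACK"
      · subst h2
        have hs : (("recv ACK" : String) == "recv SYN") = false := by decide
        simp only [List.foldl_cons, List.filter_cons, List.map_cons, hs,
          show (("recv ACK" : String) == "recv ACK") = true by decide,
          eq_self_iff_true, if_true, Bool.false_eq_true, if_false]
        exact ih _ _
      · have hs : (t == "recv SYN") = false := by simp [h1]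
        have ha : (t == "recv ACK") = false := by simp [h2]
        simp only [List.foldl_cons, List.filter_cons, hs, ha,
          Bool.false_eq_true, if_false]
        exact ih _ _

-- B's per-IP signed sum equals SYN count minus ACK count for that IP
lemma pvSumSigned (events : List (String × String)) (ip : String) :
    ((events.filter (fun e => e.1 == ip)).map (fun e =>
      (if e.2 == "recv SYN" then (1 : Int) else 0) -
      (if e.2 == "recv ACK" then (1 : Int) else 0))).sum
    = (((events.filter (fun e => e.2 == "recv SYN")).map (·.1)).count ip : Int)
      - (((events.filter (fun e => e.2 == "recv ACK")).map (·.1)).count ip : Int) := by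
  induction events with
  | nil => simp
  | cons e rest ih =>
    by_cases h0 : e.1 = ip <;>
      by_cases h1 : e.2 = "recv SYN" <;>
        by_cases h2 : e.2 = "recv ACK" <;>
          simp_all [List.count_cons] <;> omega

-- ===== VERDICT (by name: the statement is the Claim_ definition above) =====
theorem detect_syn_flood_spec : Claim_equal_detect_syn_flood := by
  intro events threshold _
  unfold Spec_detect_syn_flood detect_syn_flood detect_syn_flood_alt
  rw [pvFoldPair]
  simp only [PySem.Dict.foldl_insert_getD_add_one_eq_counter, PySem.Dict.items_counter,
    List.any_map]
  congr 1
  funext ip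
  simp only [Function.comp_apply, PySem.Dict.foldl_insert_getD_add_one_eq_counter,
    PySem.Dict.getD_counter]
  rw [pvSumSigned]
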